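-- pv_equiv track=rewrite | github.com/VaranRohila/notescribe | backend/main.py | apply_label_annealing
-- ===== SOURCE A (Python) =====
-- from typing import List
--
-- def apply_label_annealing(tags: List[str]) -> List[str]:
--     """Apply heuristics to correct BIO tagging errors"""
--     corrected_tags = tags.copy()
--
--     # Fix: B- followed by I- of different type
--     for i in range(len(corrected_tags) - 1):
--         if corrected_tags[i].startswith("B-") and corrected_tags[i+1].startswith("I-"):
--             curr_type = corrected_tags[i][2:]
--             next_type = corrected_tags[i+1][2:]
--             if curr_type != next_type:
--                 corrected_tags[i] = "B-" + next_type
--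
--     # Fix: O tags between B-/I- and I- of same type
--     i = 0
--     while i < len(corrected_tags) - 2:
--         if corrected_tags[i].startswith(("B-", "I-")):
--             start_type = corrected_tags[i][2:]
--             j = i + 1
--             while j < len(corrected_tags) and corrected_tags[j] == "O":
--                 j += 1
--             if j < len(corrected_tags) and corrected_tags[j].startswith("I-"):
--                 end_type = corrected_tags[j][2:]
--                 if start_type == end_type:
--                     for k in range(i + 1, j):
--                         corrected_tags[k] = "I-" + start_type
--             i = j
--         else:
--             i += 1
--     return corrected_tags
-- ===== SOURCE B (Python) =====
-- from typing import List
--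
-- def apply_label_annealing(tags: List[str]) -> List[str]:
--     """Apply heuristics to correct BIO tagging errors (single-pass rewrite)."""
--     n = len(tags)
--     # Phase 1: a B- immediately followed by an I- of a different type adopts that type.
--     out = [
--         "B-" + tags[i + 1][2:]
--         if (i + 1 < n
--             and tags[i].startswith("B-")
--             and tags[i + 1].startswith("I-")
--             and tags[i][2:] != tags[i + 1][2:])
--         else tags[i]
--         for i in range(n)
--     ]
--     # Phase 2: one flat pass carrying the last B-/I- anchor still connected by O's.
--     anchor = None  # (index, entity type) of the last anchor, or None
--     for i in range(n):
--         tag = out[i]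
--         if tag.startswith("B-") or tag.startswith("I-"):
--             t = tag[2:]
--             if anchor is not None and tag.startswith("I-") and anchor[1] == t:
--                 for k in range(anchor[0] + 1, i):
--                     out[k] = "I-" + t
--             anchor = (i, t)
--         elif tag != "O":
--             anchor = None
--     return out
-- ===== Notes on version B (the rewrite author's own statement) =====
-- stated objective: alternative
-- what changed: Phase 1 becomes a pure per-position map over the original tags instead of an in-place mutating loop, and phase 2's nested while-loop with an inner O-scan and pointer jump (i = j) is replaced by a single flat pass that carries the last B-/I- anchor (index, type) as state and fills the O-gap when a matching I- tag is reached.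
import Mathlib
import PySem

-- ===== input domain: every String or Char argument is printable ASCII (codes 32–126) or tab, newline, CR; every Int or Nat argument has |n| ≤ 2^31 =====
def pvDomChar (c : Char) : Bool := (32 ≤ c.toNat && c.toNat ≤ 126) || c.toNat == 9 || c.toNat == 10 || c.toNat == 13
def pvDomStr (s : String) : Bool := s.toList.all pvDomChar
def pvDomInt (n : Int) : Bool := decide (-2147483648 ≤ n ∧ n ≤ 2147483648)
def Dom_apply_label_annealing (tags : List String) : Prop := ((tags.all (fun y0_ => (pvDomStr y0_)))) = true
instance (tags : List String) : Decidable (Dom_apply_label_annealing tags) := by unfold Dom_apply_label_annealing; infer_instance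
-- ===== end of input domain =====

-- B rewrites A's mutating phase-1 loop as a per-position map and A's nested O-scanning
-- while-loop (phase 2) as one flat pass carrying the last B-/I- anchor as state; same cost.

-- ===== PORT A =====
-- helpers shared by both ports: both Pythons test tag.startswith("B-"/"I-"), take tag[2:],
-- and contain the identical 'for k in range(s, e): l[k] = "I-" + t' fill loop.
def pvIsB (s : String) : Bool := PySem.Str.startswith s "B-"
def pvIsI (s : String) : Bool := PySem.Str.startswith s "I-"
def pvDrop2 (s : String) : String := PySem.Str.slice s (some 2) none
def pvFill (l : List String) (s e : Nat) (t : String) : List String :=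
  if s < e then pvFill (l.set s ("I-" ++ t)) (s + 1) e t else l
termination_by e - s

theorem pvFill_length (l : List String) (s e : Nat) (t : String) :
    (pvFill l s e t).length = l.length := by
  fun_induction pvFill <;> simp_all

-- inner 'while j < len(ct) and ct[j] == "O": j += 1' of A
def pvScan (l : List String) (j : Nat) : Nat :=
  if h : j < l.length ∧ l.getD j "" = "O" then pvScan l (j + 1) else j
termination_by l.length - j
decreasing_by omega

theorem pvScan_ge (l : List String) (j : Nat) : j ≤ pvScan l j := by
  fun_induction pvScan <;> omega

-- phase 1 of A: in-place loop over range(len-1)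
def pvPhase1A (ct : List String) : List String :=
  (List.range (ct.length - 1)).foldl
    (fun acc i =>
      if pvIsB (acc.getD i "") && pvIsI (acc.getD (i + 1) "") then
        if pvDrop2 (acc.getD i "") != pvDrop2 (acc.getD (i + 1) "") then
          acc.set i ("B-" ++ pvDrop2 (acc.getD (i + 1) ""))
        else acc
      else acc)
    ct

-- phase 2 of A: outer while with inner O-scan and the i = j jump
def pvAnnealA (l : List String) (i : Nat) : List String :=
  if hg : i < l.length - 2 then
    if pvIsB (l.getD i "") || pvIsI (l.getD i "") then
      pvAnnealA
        (if (decide (pvScan l (i + 1) < l.length)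
              && pvIsI (l.getD (pvScan l (i + 1)) "")
              && (pvDrop2 (l.getD i "") == pvDrop2 (l.getD (pvScan l (i + 1)) ""))) then
            pvFill l (i + 1) (pvScan l (i + 1)) (pvDrop2 (l.getD i ""))
          else l)
        (pvScan l (i + 1))
    else pvAnnealA l (i + 1)
  else l
termination_by l.length - i
decreasing_by
  · have h1 := pvScan_ge l (i + 1)
    split
    · rw [pvFill_length]; omega
    · omega
  · omega

def apply_label_annealing (tags : List String) : List String :=
  pvAnnealA (pvPhase1A tags) 0

-- ===== PORT B =====
-- phase 1 of B: per-position comprehension reading the ORIGINAL tags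
def pvPhase1B (tags : List String) : List String :=
  (List.range tags.length).map (fun i =>
    if (decide (i + 1 < tags.length)
        && pvIsB (tags.getD i "")
        && pvIsI (tags.getD (i + 1) "")
        && (pvDrop2 (tags.getD i "") != pvDrop2 (tags.getD (i + 1) ""))) then
      "B-" ++ pvDrop2 (tags.getD (i + 1) "")
    else tags.getD i "")

-- phase 2 of B: one flat pass carrying the last anchor (index, type)
def pvAnnealB (l : List String) (i : Nat) (anchor : Option (Nat × String)) : List String :=
  if hg : i < l.length then
    if pvIsB (l.getD i "") || pvIsI (l.getD i "") then
      pvAnnealB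
        (match anchor with
         | some (a, ty) =>
             if pvIsI (l.getD i "") && (ty == pvDrop2 (l.getD i "")) then
               pvFill l (a + 1) i (pvDrop2 (l.getD i ""))
             else l
         | none => l)
        (i + 1) (some (i, pvDrop2 (l.getD i "")))
    else if l.getD i "" != "O" then pvAnnealB l (i + 1) none
    else pvAnnealB l (i + 1) anchor
  else l
termination_by l.length - i
decreasing_by
  · split
    · split
      · rw [pvFill_length]; omega
      · omega
    · omega
  · omega
  · omega

def apply_label_annealing_alt (tags : List String) : List String :=
  pvAnnealB (pvPhase1B tags) 0 none

-- ===== PRECONDITION & SPEC =====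
def Spec_apply_label_annealing (tags : List String) (out : List String) : Prop := out = apply_label_annealing_alt tags
instance (tags : List String) (out : List String) : Decidable (Spec_apply_label_annealing tags out) := by unfold Spec_apply_label_annealing; infer_instance

-- ===== CLAIM (what is proved, stated in full; the proofs are below) =====
def Claim_equal_apply_label_annealing : Prop := ∀ (tags : List String), Dom_apply_label_annealing tags → Spec_apply_label_annealing tags (apply_label_annealing tags)

-- ===== LEMMAS AND PROOFS =====

theorem pvFill_nil (l : List String) (s e : Nat) (t : String) (h : e ≤ s) :
    pvFill l s e t = l := by
  unfold pvFill
  simp [Nat.not_lt.mpr h]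

theorem pvFill_getD_ge (l : List String) (s e : Nat) (t : String) (m : Nat)
    (hm : m < s ∨ e ≤ m) : (pvFill l s e t).getD m "" = l.getD m "" := by
  fun_induction pvFill generalizing m with
  | case1 l s hse ih =>
    rw [ih m (by omega)]
    have hne : s ≠ m := by omega
    simp [List.getD_eq_getElem?_getD, hne]
  | case2 => rfl

theorem pvScan_le_length (l : List String) (j : Nat) (h : j ≤ l.length) :
    pvScan l j ≤ l.length := by
  fun_induction pvScan <;> omega

theorem pvScan_gap (l : List String) (j : Nat) :
    ∀ m, j ≤ m → m < pvScan l j → l.getD m "" = "O" := by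
  fun_induction pvScan with
  | case1 j h ih =>
    intro m hm1 hm2
    rcases Nat.eq_or_lt_of_le hm1 with rfl | h'
    · exact h.2
    · exact ih m h' hm2
  | case2 j h =>
    intro m hm1 hm2
    omega

theorem pvScan_stop (l : List String) (j : Nat) (h : pvScan l j < l.length) :
    l.getD (pvScan l j) "" ≠ "O" := by
  fun_induction pvScan with
  | case1 j hc ih => exact ih h
  | case2 j hc => intro hO; exact hc ⟨h, hO⟩

theorem getD_out (l : List String) (i : Nat) (h : l.length ≤ i) : l.getD i "" = "" :=
  List.getD_eq_default l "" h

-- terminal behaviour of B's pass: at most one position left, anchor too recent to fill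
theorem lemB_last (l : List String) (i : Nat) (anchor : Option (Nat × String))
    (h1 : l.length ≤ i + 1)
    (h2 : ∀ a ty, i < l.length → anchor = some (a, ty) → i ≤ a + 1) :
    pvAnnealB l i anchor = l := by
  rw [pvAnnealB.eq_def]
  split
  · rename_i hg
    split
    · rename_i hcls
      rcases anchor with _ | ⟨a, ty⟩
      · exact lemB_last l (i + 1) _ (by omega) (by rintro a ty hlt heq; simp at heq; omega)
      · have hai : i ≤ a + 1 := h2 a ty hg rfl
        have hfill : (if (pvIsI (l.getD i "") && (ty == pvDrop2 (l.getD i ""))) = true then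
               pvFill l (a + 1) i (pvDrop2 (l.getD i "")) else l) = l := by
          split
          · exact pvFill_nil _ _ _ _ hai
          · rfl
        show pvAnnealB (if (pvIsI (l.getD i "") && (ty == pvDrop2 (l.getD i ""))) = true then
               pvFill l (a + 1) i (pvDrop2 (l.getD i "")) else l) (i + 1)
               (some (i, pvDrop2 (l.getD i ""))) = l
        rw [hfill]
        exact lemB_last l (i + 1) _ (by omega) (by rintro a ty hlt heq; simp at heq; omega)
    · split
      · exact lemB_last l (i + 1) none (by omega) (by intro a ty _ h; cases h)
      · exact lemB_last l (i + 1) anchor (by omega) (by intro a ty hlt _; omega)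
  · rfl
termination_by l.length - i

theorem lemB_end_none (l : List String) (i : Nat) (h : l.length ≤ i + 2) :
    pvAnnealB l i none = l := by
  by_cases h1 : l.length ≤ i + 1
  · exact lemB_last l i none h1 (by intro a ty _ h; cases h)
  · rw [pvAnnealB.eq_def]
    split
    · split
      · exact lemB_last l (i + 1) _ (by omega) (by rintro a ty _ heq; simp at heq; omega)
      · split
        · exact lemB_last l (i + 1) none (by omega) (by intro a ty _ h; cases h)
        · exact lemB_last l (i + 1) none (by omega) (by intro a ty _ h; cases h)
    · rfl

theorem lemA_end (l : List String) (i : Nat) (h : ¬ i < l.length - 2) :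
    pvAnnealA l i = l := by
  unfold pvAnnealA
  simp [h]

-- walking an all-"O" gap leaves B's state alone
theorem lemB_gap (l : List String) (anchor : Option (Nat × String)) (j k : Nat)
    (hk : k ≤ j) (hj : j ≤ l.length)
    (hO : ∀ m, k ≤ m → m < j → l.getD m "" = "O") :
    pvAnnealB l k anchor = pvAnnealB l j anchor := by
  by_cases hkj : k = j
  · rw [hkj]
  · have hkl : k < l.length := by omega
    have hOk : l.getD k "" = "O" := hO k le_rfl (by omega)
    conv_lhs => rw [pvAnnealB.eq_def]
    rw [dif_pos hkl, hOk]
    have e1 : (pvIsB "O" || pvIsI "O") = false := by decide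
    have e2 : ("O" != "O") = false := by decide
    rw [e1, e2]
    simp only [Bool.false_eq_true, if_false]
    exact lemB_gap l anchor j (k + 1) (by omega) hj (fun m h1 h2 => hO m (by omega) h2)
termination_by j - k

-- the simulation: A's jumpy while-loop equals B's flat anchored pass
theorem sim (l : List String) (i : Nat) :
    (pvAnnealA l i = pvAnnealB l i none) ∧
    ((pvIsB (l.getD i "") || pvIsI (l.getD i "")) = true →
      pvAnnealA l i = pvAnnealB l (i + 1) (some (i, pvDrop2 (l.getD i "")))) := by
  have h3 : (pvIsB (l.getD i "") || pvIsI (l.getD i "")) = true →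
      pvAnnealA l i = pvAnnealB l (i + 1) (some (i, pvDrop2 (l.getD i ""))) := by
    intro hcls
    by_cases hg : i < l.length - 2
    · have hji : i + 1 ≤ pvScan l (i + 1) := pvScan_ge l (i + 1)
      have hjl : pvScan l (i + 1) ≤ l.length := pvScan_le_length l (i + 1) (by omega)
      conv_lhs => rw [pvAnnealA.eq_def]
      rw [dif_pos hg, if_pos hcls]
      rw [lemB_gap l (some (i, pvDrop2 (l.getD i ""))) (pvScan l (i + 1)) (i + 1) hji hjl
          (fun m h1 h2 => pvScan_gap l (i + 1) m h1 h2)]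
      by_cases hjlen : pvScan l (i + 1) < l.length
      · by_cases hclsj : (pvIsB (l.getD (pvScan l (i + 1)) "")
            || pvIsI (l.getD (pvScan l (i + 1)) "")) = true
        · conv_rhs => rw [pvAnnealB.eq_def]
          rw [dif_pos hjlen, if_pos hclsj]
          have hfe : (if (decide (pvScan l (i + 1) < l.length)
                  && pvIsI (l.getD (pvScan l (i + 1)) "")
                  && (pvDrop2 (l.getD i "") == pvDrop2 (l.getD (pvScan l (i + 1)) ""))) = true then
                pvFill l (i + 1) (pvScan l (i + 1)) (pvDrop2 (l.getD i ""))
              else l)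
              = (if (pvIsI (l.getD (pvScan l (i + 1)) "")
                  && (pvDrop2 (l.getD i "") == pvDrop2 (l.getD (pvScan l (i + 1)) ""))) = true then
                pvFill l (i + 1) (pvScan l (i + 1)) (pvDrop2 (l.getD (pvScan l (i + 1)) ""))
              else l) := by
            simp only [hjlen, decide_true, Bool.true_and]
            split
            · rename_i hcc
              rw [Bool.and_eq_true] at hcc
              rw [eq_of_beq hcc.2]
            · rfl
          rw [hfe]
          set Lb := (if (pvIsI (l.getD (pvScan l (i + 1)) "")
                  && (pvDrop2 (l.getD i "") == pvDrop2 (l.getD (pvScan l (i + 1)) ""))) = true then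
                pvFill l (i + 1) (pvScan l (i + 1)) (pvDrop2 (l.getD (pvScan l (i + 1)) ""))
              else l) with hLb
          have hlen : Lb.length = l.length := by
            rw [hLb]; split
            · exact pvFill_length ..
            · rfl
          have hsame : Lb.getD (pvScan l (i + 1)) "" = l.getD (pvScan l (i + 1)) "" := by
            rw [hLb]; split
            · exact pvFill_getD_ge _ _ _ _ _ (Or.inr le_rfl)
            · rfl
          have hrec := (sim Lb (pvScan l (i + 1))).2 (by rw [hsame]; exact hclsj)
          rw [hsame] at hrec
          exact hrec
        · have hIj : pvIsI (l.getD (pvScan l (i + 1)) "") = false := by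
            simp only [Bool.or_eq_true, not_or, Bool.not_eq_true] at hclsj
            exact hclsj.2
          have hstop : l.getD (pvScan l (i + 1)) "" ≠ "O" := pvScan_stop l (i + 1) hjlen
          rw [if_neg (by simp only [hIj, Bool.and_false, Bool.false_and, Bool.false_eq_true, not_false_eq_true])]
          conv_rhs => rw [pvAnnealB.eq_def]
          rw [dif_pos hjlen, if_neg hclsj, if_pos (by simp only [bne_iff_ne, ne_eq]; exact hstop)]
          rw [(sim l (pvScan l (i + 1))).1]
          conv_lhs => rw [pvAnnealB.eq_def]
          rw [dif_pos hjlen, if_neg hclsj, if_pos (by simp only [bne_iff_ne, ne_eq]; exact hstop)]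
      · rw [if_neg (by simp [hjlen])]
        rw [lemA_end l (pvScan l (i + 1)) (by omega)]
        conv_rhs => rw [pvAnnealB.eq_def]
        rw [dif_neg (by omega)]
    · rw [lemA_end l i hg]
      exact (lemB_last l (i + 1) _ (by omega)
        (by rintro a ty _ heq; simp at heq; omega)).symm
  refine ⟨?_, h3⟩
  by_cases hg : i < l.length - 2
  · by_cases hcls : (pvIsB (l.getD i "") || pvIsI (l.getD i "")) = true
    · rw [h3 hcls]
      conv_rhs => rw [pvAnnealB.eq_def]
      rw [dif_pos (show i < l.length by omega), if_pos hcls]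
    · conv_lhs => rw [pvAnnealA.eq_def]
      rw [dif_pos hg, if_neg hcls]
      rw [(sim l (i + 1)).1]
      conv_rhs => rw [pvAnnealB.eq_def]
      rw [dif_pos (show i < l.length by omega), if_neg hcls]
      split
      · rfl
      · rfl
  · rw [lemA_end l i hg, lemB_end_none l i (by omega)]
termination_by l.length - i
decreasing_by
  · rw [hlen]; omega
  · omega
  · omega

theorem ext_getD (l1 l2 : List String) (hlen : l1.length = l2.length)
    (h : ∀ m, l1.getD m "" = l2.getD m "") : l1 = l2 := by
  apply List.ext_getElem hlen
  intro m h1 h2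
  have hm := h m
  rwa [List.getD_eq_getElem l1 "" h1, List.getD_eq_getElem l2 "" h2] at hm

-- invariant of A's phase-1 fold: positions already visited carry B's per-position value
theorem p1_inv (tags : List String) (k : Nat) (hk : k ≤ tags.length - 1) :
    ((List.range k).foldl
      (fun acc i =>
        if pvIsB (acc.getD i "") && pvIsI (acc.getD (i + 1) "") then
          if pvDrop2 (acc.getD i "") != pvDrop2 (acc.getD (i + 1) "") then
            acc.set i ("B-" ++ pvDrop2 (acc.getD (i + 1) ""))
          else acc
        else acc) tags).length = tags.length ∧
    (∀ m, ((List.range k).foldl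
      (fun acc i =>
        if pvIsB (acc.getD i "") && pvIsI (acc.getD (i + 1) "") then
          if pvDrop2 (acc.getD i "") != pvDrop2 (acc.getD (i + 1) "") then
            acc.set i ("B-" ++ pvDrop2 (acc.getD (i + 1) ""))
          else acc
        else acc) tags).getD m "" =
      if m < k then
        (if (decide (m + 1 < tags.length)
            && pvIsB (tags.getD m "")
            && pvIsI (tags.getD (m + 1) "")
            && (pvDrop2 (tags.getD m "") != pvDrop2 (tags.getD (m + 1) ""))) = true then
          "B-" ++ pvDrop2 (tags.getD (m + 1) "")
        else tags.getD m "")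
      else tags.getD m "") := by
  induction k with
  | zero => simp
  | succ k ih =>
    obtain ⟨ihl, ihg⟩ := ih (by omega)
    have hk2 : k + 1 < tags.length := by omega
    rw [List.range_succ, List.foldl_append, List.foldl_cons, List.foldl_nil]
    generalize hR : (List.range k).foldl
      (fun acc i =>
        if pvIsB (acc.getD i "") && pvIsI (acc.getD (i + 1) "") then
          if pvDrop2 (acc.getD i "") != pvDrop2 (acc.getD (i + 1) "") then
            acc.set i ("B-" ++ pvDrop2 (acc.getD (i + 1) ""))
          else acc
        else acc) tags = r at ihl ihg
    have hrk : r.getD k "" = tags.getD k "" := by rw [ihg k, if_neg (by omega)]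
    have hrk1 : r.getD (k + 1) "" = tags.getD (k + 1) "" := by
      rw [ihg (k + 1), if_neg (by omega)]
    simp only [hrk, hrk1]
    split
    · rename_i hc1
      split
      · rename_i hc2
        refine ⟨by rw [List.length_set, ihl], ?_⟩
        intro m
        by_cases hmk : m = k
        · subst hmk
          rw [List.getD_eq_getElem _ _ (by rw [List.length_set, ihl]; omega)]
          simp only [List.getElem_set_self]
          rw [if_pos (show m < m + 1 by omega), if_pos (by
            simp only [Bool.and_eq_true, decide_eq_true_eq]
            rw [Bool.and_eq_true] at hc1
            exact ⟨⟨⟨by omega, hc1.1⟩, hc1.2⟩, hc2⟩)]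
        · have : (r.set k ("B-" ++ pvDrop2 (tags.getD (k + 1) ""))).getD m ""
              = r.getD m "" := by
            have hne : k ≠ m := fun h => hmk h.symm
            simp [List.getD_eq_getElem?_getD, hne]
          rw [this, ihg m]
          by_cases hmlt : m < k
          · rw [if_pos hmlt, if_pos (show m < k + 1 by omega)]
          · rw [if_neg hmlt, if_neg (show ¬ m < k + 1 by omega)]
      · rename_i hc2
        refine ⟨ihl, ?_⟩
        intro m
        rw [ihg m]
        by_cases hmk : m = k
        · subst hmk
          rw [if_neg (show ¬ m < m by omega), if_pos (show m < m + 1 by omega), if_neg (by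
            simp only [Bool.not_eq_true] at hc2 ⊢
            rw [hc2, Bool.and_false])]
        · by_cases hmlt : m < k
          · rw [if_pos hmlt, if_pos (show m < k + 1 by omega)]
          · rw [if_neg hmlt, if_neg (show ¬ m < k + 1 by omega)]
    · rename_i hc1
      refine ⟨ihl, ?_⟩
      intro m
      rw [ihg m]
      by_cases hmk : m = k
      · subst hmk
        rw [if_neg (show ¬ m < m by omega), if_pos (show m < m + 1 by omega), if_neg (by
          simp only [Bool.not_eq_true] at hc1 ⊢
          cases hB : pvIsB (tags.getD m "") <;>
            cases hI : pvIsI (tags.getD (m + 1) "") <;> simp_all)]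
      · by_cases hmlt : m < k
        · rw [if_pos hmlt, if_pos (show m < k + 1 by omega)]
        · rw [if_neg hmlt, if_neg (show ¬ m < k + 1 by omega)]

-- phase-1 agreement
theorem phase1_eq (tags : List String) : pvPhase1A tags = pvPhase1B tags := by
  obtain ⟨hl, hg⟩ := p1_inv tags (tags.length - 1) le_rfl
  apply ext_getD
  · show ((List.range (tags.length - 1)).foldl _ tags).length = (pvPhase1B tags).length
    rw [hl]; simp [pvPhase1B]
  · intro m
    show ((List.range (tags.length - 1)).foldl _ tags).getD m "" = (pvPhase1B tags).getD m ""
    rw [hg m]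
    have hB : (pvPhase1B tags).getD m "" =
        if m < tags.length then
          (if (decide (m + 1 < tags.length)
              && pvIsB (tags.getD m "")
              && pvIsI (tags.getD (m + 1) "")
              && (pvDrop2 (tags.getD m "") != pvDrop2 (tags.getD (m + 1) ""))) = true then
            "B-" ++ pvDrop2 (tags.getD (m + 1) "")
          else tags.getD m "")
        else "" := by
      by_cases h : m < tags.length
      · rw [List.getD_eq_getElem _ _ (by simp [pvPhase1B, h]), if_pos h]
        simp [pvPhase1B, h]
      · rw [getD_out _ _ (by simp [pvPhase1B]; omega), if_neg h]
    rw [hB]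
    by_cases h1 : m < tags.length - 1
    · rw [if_pos h1, if_pos (show m < tags.length by omega)]
    · rw [if_neg h1]
      by_cases h2 : m < tags.length
      · rw [if_pos h2, if_neg (by
          simp only [Bool.not_eq_true]
          have : decide (m + 1 < tags.length) = false := by simp; omega
          rw [this, Bool.false_and, Bool.false_and, Bool.false_and])]
      · rw [if_neg h2, getD_out _ _ (by omega)]

-- ===== VERDICT (by name: the statement is the Claim_ definition above) =====
theorem apply_label_annealing_spec : Claim_equal_apply_label_annealing := by
  intro tags _
  unfold Spec_apply_label_annealing apply_label_annealing apply_label_annealing_alt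
  rw [phase1_eq]
  exact (sim (pvPhase1B tags) 0).1
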